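-- pv_equiv track=rewrite | github.com/noisebridge/nb_whiteboarding | 2018-12-26/nchoosek/n_choose_k_by_leading_subprobs.py | gen_n_choose_k_bitsets
-- ===== SOURCE A (Python) =====
-- def gen_n_choose_k_bitsets(n, k):
--     if n == 0:
--         # Base case
--         if k == 0:
--             yield 0
--         else:
--             raise ValueError("Illegal value for k: {}. (n = {})".format(k, n))
--     elif n >= 1:
--         if k > 0 and n >= k:
--             # Choose it...
--             for rest in gen_n_choose_k_bitsets(n - 1, k - 1):
--                 yield (1 << (n - 1)) | rest
--
--         if n - 1 >= k:
--             # ...or don't.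
--             for rest in gen_n_choose_k_bitsets(n - 1, k):
--                 yield rest
--     else:
--         raise ValueError("Illegal value for n: {}. (k = {})".format(n, k))
-- ===== SOURCE B (Python) =====
-- def gen_n_choose_k_bitsets(n, k):
--     # Recurse on k: pick the highest set bit position p (from n-1 down to k-1),
--     # then fill the remaining k-1 bits below it. Emits in the same descending order.
--     if k == 0:
--         yield 0
--         return
--     for p in range(n - 1, k - 2, -1):
--         high = 1 << p
--         for rest in gen_n_choose_k_bitsets(p, k - 1):
--             yield high | rest
-- ===== Notes on version B (the rewrite author's own statement) =====
-- stated objective: alternative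
-- what changed: Instead of A's choose/skip recursion on n (one recursion level per bit position, including skipped ones), B recurses on k: it loops the highest set bit position p from n-1 down to k-1 and recursively fills the k-1 lower bits, emitting the same masks in the same descending order; it trades A's depth-n choose/skip tree for a depth-k loop-over-positions tree.
import Mathlib
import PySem

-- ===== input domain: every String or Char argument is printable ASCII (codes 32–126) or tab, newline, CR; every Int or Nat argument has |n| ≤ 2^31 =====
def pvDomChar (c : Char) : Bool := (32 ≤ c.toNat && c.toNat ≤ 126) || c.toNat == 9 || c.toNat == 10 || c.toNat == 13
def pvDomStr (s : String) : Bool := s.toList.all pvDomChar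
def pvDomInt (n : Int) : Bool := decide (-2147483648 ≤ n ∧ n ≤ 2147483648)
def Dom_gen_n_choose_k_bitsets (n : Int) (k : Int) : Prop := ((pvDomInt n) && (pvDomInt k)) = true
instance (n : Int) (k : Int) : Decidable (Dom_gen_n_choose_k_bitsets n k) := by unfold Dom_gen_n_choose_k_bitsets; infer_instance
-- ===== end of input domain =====

-- B re-implements the enumeration by recursing on k (loop the highest set bit position
-- from n-1 down to k-1, recursively fill the bits below) instead of A's choose/skip
-- recursion on n; same masks in the same descending order (objective: alternative).


-- ===== PORT A =====
-- Literal port of A; a generator's return value is the list of its yields.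
-- The two 'raise ValueError' branches return [] here; Pre_ excludes exactly those inputs.
-- '1 << (n - 1)' is ported as '(1 : Int) <<< (n - 1).toNat' (exact: the branch has n ≥ 1).
def gen_n_choose_k_bitsets (n : Int) (k : Int) : List Int :=
  if n = 0 then
    if k = 0 then [0] else []          -- raise ValueError (outside Pre_)
  else if n ≥ 1 then
    (if k > 0 ∧ n ≥ k then
      (gen_n_choose_k_bitsets (n - 1) (k - 1)).map
        (fun rest => Int.lor ((1 : Int) <<< (n - 1).toNat) rest)
     else []) ++
    (if n - 1 ≥ k then gen_n_choose_k_bitsets (n - 1) k else [])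
  else []                              -- raise ValueError (outside Pre_)
termination_by n.toNat
decreasing_by all_goals omega

-- ===== PORT B =====
-- Literal port of Source B: recursion on k, 'for p in range(n-1, k-2, -1)' over the highest
-- set bit position.  The 'k < 0' guard only makes the recursion total; Pre_ excludes k < 0
-- (there the Python B recurses without reaching its base case).
def gen_n_choose_k_bitsets_alt (n : Int) (k : Int) : List Int :=
  if k = 0 then [0]
  else if k < 0 then []                -- totality guard, outside Pre_
  else
    (PySem.List.pyRange (n - 1) (k - 2) (-1)).foldl
      (fun acc p =>
        acc ++ (gen_n_choose_k_bitsets_alt p (k - 1)).map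
          (fun rest => Int.lor ((1 : Int) <<< p.toNat) rest)) []
termination_by k.toNat
decreasing_by all_goals omega

-- ===== PRECONDITION & SPEC =====
-- Pre_: exactly the inputs on which A returns normally; A raises ValueError when n < 0,
-- when k < 0 (reached at the n = 0 base), or when n = 0 with k ≠ 0.
def Pre_gen_n_choose_k_bitsets (n : Int) (k : Int) : Prop :=
  0 ≤ n ∧ 0 ≤ k ∧ (n = 0 → k = 0)
instance (n : Int) (k : Int) : Decidable (Pre_gen_n_choose_k_bitsets n k) := by
  unfold Pre_gen_n_choose_k_bitsets; infer_instance
def pvWitness_gen_n_choose_k_bitsets : Int × Int := (4, 2)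

def Spec_gen_n_choose_k_bitsets (n : Int) (k : Int) (out : List Int) : Prop := out = gen_n_choose_k_bitsets_alt n k
instance (n : Int) (k : Int) (out : List Int) : Decidable (Spec_gen_n_choose_k_bitsets n k out) := by unfold Spec_gen_n_choose_k_bitsets; infer_instance

-- ===== CLAIM (what is proved, stated in full; the proofs are below) =====
def Claim_equal_gen_n_choose_k_bitsets : Prop := ∀ (n : Int) (k : Int), Dom_gen_n_choose_k_bitsets n k → Pre_gen_n_choose_k_bitsets n k → Spec_gen_n_choose_k_bitsets n k (gen_n_choose_k_bitsets n k)

-- ===== LEMMAS AND PROOFS =====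

-- A at k = 0: the 'skip' chain down to the base case yields exactly [0].
theorem gen_zero (m : Nat) : gen_n_choose_k_bitsets (m : Int) 0 = [0] := by
  induction m with
  | zero => simp [gen_n_choose_k_bitsets]
  | succ m ih =>
      rw [gen_n_choose_k_bitsets]
      have h0 : ¬ ((m : Int) + 1 = 0) := by omega
      have h1 : ((m : Int) + 1) ≥ 1 := by omega
      have h2 : ((m : Int) + 1) - 1 = (m : Int) := by ring
      simp only [Nat.cast_succ, h0, if_false, h1, if_true, h2]
      simp [ih]

-- B at k = 0.
theorem alt_zero (n : Int) : gen_n_choose_k_bitsets_alt n 0 = [0] := by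
  rw [gen_n_choose_k_bitsets_alt]; simp

-- B's loop as a flatMap over the descending position range (k ≥ 1).
theorem alt_eq_flatMap (n k : Int) (hk : 1 ≤ k) :
    gen_n_choose_k_bitsets_alt n k =
      (PySem.List.pyRange (n - 1) (k - 2) (-1)).flatMap
        (fun p => (gen_n_choose_k_bitsets_alt p (k - 1)).map
          (fun rest => Int.lor ((1 : Int) <<< p.toNat) rest)) := by
  rw [gen_n_choose_k_bitsets_alt]
  have h0 : ¬ (k = 0) := by omega
  have h1 : ¬ (k < 0) := by omega
  simp only [h0, if_false, h1]
  rw [PySem.List.foldl_append_eq_flatMap]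
  simp

-- Main equivalence, by strong induction on n (as a natural number), generalizing k.
theorem main_eq (m : Nat) :
    ∀ (k : Int), 0 ≤ k → ((m : Int) = 0 → k = 0) →
      gen_n_choose_k_bitsets (m : Int) k = gen_n_choose_k_bitsets_alt (m : Int) k := by
  induction m using Nat.strong_induction_on with
  | _ m ih =>
    intro k hk hbase
    by_cases hk0 : k = 0
    · subst hk0; rw [gen_zero, alt_zero]
    · have hk1 : 1 ≤ k := by omega
      have hm1 : 1 ≤ m := by
        by_contra h
        have : m = 0 := by omega
        exact hk0 (hbase (by simp [this]))
      rw [alt_eq_flatMap _ _ hk1]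
      rw [gen_n_choose_k_bitsets]
      have h0 : ¬ ((m : Int) = 0) := by omega
      have h1 : ((m : Int)) ≥ 1 := by omega
      simp only [h0, if_false, h1, if_true]
      by_cases hnk : (m : Int) ≥ k
      · -- range is (m-1) :: range (m-2) …
        have hcons := PySem.List.pyRange_neg_one_cons
          (a := (m : Int) - 1) (b := k - 2) (by omega)
        rw [hcons, List.flatMap_cons]
        have hfirst : k > 0 ∧ (m : Int) ≥ k := ⟨by omega, hnk⟩
        rw [if_pos hfirst]
        have hm1cast : ((m : Int) - 1) = ((m - 1 : Nat) : Int) := by omega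
        have hIH1 : gen_n_choose_k_bitsets ((m : Int) - 1) (k - 1)
            = gen_n_choose_k_bitsets_alt ((m : Int) - 1) (k - 1) := by
          rw [hm1cast]
          exact ih (m - 1) (by omega) (k - 1) (by omega) (by intro h; omega)
        rw [hIH1]
        congr 1
        by_cases htail : (m : Int) - 1 ≥ k
        · rw [if_pos htail]
          have hIH2 : gen_n_choose_k_bitsets ((m : Int) - 1) k
              = gen_n_choose_k_bitsets_alt ((m : Int) - 1) k := by
            rw [hm1cast]
            exact ih (m - 1) (by omega) k (by omega) (by intro h; omega)
          rw [hIH2, alt_eq_flatMap _ _ hk1]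
        · rw [if_neg htail]
          rw [PySem.List.pyRange_neg_one_eq_nil (by omega)]
          simp
      · -- m < k: both sides empty
        have hfirst : ¬ (k > 0 ∧ (m : Int) ≥ k) := by omega
        have htail : ¬ ((m : Int) - 1 ≥ k) := by omega
        rw [if_neg hfirst, if_neg htail]
        rw [PySem.List.pyRange_neg_one_eq_nil (by omega)]
        simp

-- ===== VERDICT (by name: the statement is the Claim_ definition above) =====
theorem gen_n_choose_k_bitsets_spec : Claim_equal_gen_n_choose_k_bitsets := by
  intro n k _ hpre
  obtain ⟨hn, hk, hbase⟩ := hpre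
  unfold Spec_gen_n_choose_k_bitsets
  have hcast : n = ((n.toNat : Nat) : Int) := by omega
  rw [hcast]
  exact main_eq n.toNat k hk (by omega)
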